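-- pv_equiv track=rewrite | github.com/mokkeee/checkio | striped_words.py | check_stripe
-- ===== SOURCE A (Python) =====
-- def check_stripe(word, even, add):
--     for i in range(0, len(word), 2):
--         if even.find(word[i]) == -1:
--             return False
--     for i in range(1, len(word), 2):
--         if add.find(word[i]) == -1:
--             return False
--     else:
--         return True
-- ===== SOURCE B (Python) =====
-- def check_stripe(word, even, add):
--     # single pass: pick the allowed alphabet by index parity
--     for i, c in enumerate(word):
--         if (even if i % 2 == 0 else add).find(c) == -1:
--             return False
--     return True
-- ===== Notes on version B (the rewrite author's own statement) =====
-- stated objective: simpler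
-- what changed: B replaces A's two grouped index-striding passes (range(0,n,2) then range(1,n,2)) by one interleaved pass over enumerate(word) that selects the allowed alphabet by index parity and fails on the first miss.
import Mathlib
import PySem

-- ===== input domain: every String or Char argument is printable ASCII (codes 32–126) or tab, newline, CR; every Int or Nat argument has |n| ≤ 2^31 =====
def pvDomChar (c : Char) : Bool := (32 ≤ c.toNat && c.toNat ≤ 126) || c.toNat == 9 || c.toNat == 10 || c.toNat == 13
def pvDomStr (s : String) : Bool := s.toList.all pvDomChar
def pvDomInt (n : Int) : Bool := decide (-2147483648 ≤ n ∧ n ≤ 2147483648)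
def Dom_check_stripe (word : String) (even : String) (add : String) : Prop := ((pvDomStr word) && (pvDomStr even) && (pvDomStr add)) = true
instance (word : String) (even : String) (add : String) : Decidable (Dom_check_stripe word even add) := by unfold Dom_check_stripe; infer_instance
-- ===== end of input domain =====

-- B replaces A's two grouped even/odd index passes by one interleaved pass over
-- enumerate(word) that picks the allowed alphabet by index parity (objective: simpler).


-- ===== PORT A =====
-- the body of each of A's two 'for i in range(...)' loops; the 'none' branch is
-- unreachable (every produced index is in range, word[i] cannot raise)
def aLoop (word s : String) : List Int → Bool
  | [] => true
  | i :: rest =>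
    match PySem.Str.pyGet? word i with
    | none => false
    | some c =>
      if PySem.Str.find s (String.ofList [c]) == -1 then false else aLoop word s rest

def check_stripe (word : String) (even : String) (add : String) : Bool :=
  if aLoop word even (PySem.List.pyRange 0 (PySem.Str.len word) 2) then
    aLoop word add (PySem.List.pyRange 1 (PySem.Str.len word) 2)
  else false

-- ===== PORT B =====
-- B's single 'for i, c in enumerate(word)' loop (i starts at 0 and counts up)
def bGo (even add : String) (i : Nat) : List Char → Bool
  | [] => true
  | c :: rest =>
    if PySem.Str.find (if i % 2 == 0 then even else add) (String.ofList [c]) == -1 then false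
    else bGo even add (i + 1) rest

def check_stripe_alt (word : String) (even : String) (add : String) : Bool :=
  bGo even add 0 word.toList

-- ===== PRECONDITION & SPEC =====
def Spec_check_stripe (word : String) (even : String) (add : String) (out : Bool) : Prop := out = check_stripe_alt word even add
instance (word : String) (even : String) (add : String) (out : Bool) : Decidable (Spec_check_stripe word even add out) := by unfold Spec_check_stripe; infer_instance

-- ===== CLAIM (what is proved, stated in full; the proofs are below) =====
def Claim_equal_check_stripe : Prop := ∀ (word : String) (even : String) (add : String), Dom_check_stripe word even add → Spec_check_stripe word even add (check_stripe word even add)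

-- ===== LEMMAS AND PROOFS =====

-- the characters at positions 0, 2, 4, … of a list
def everyOther : List Char → List Char
  | [] => []
  | [c] => [c]
  | c :: _ :: rest => c :: everyOther rest

def testOk (s : String) (c : Char) : Bool := !(PySem.Str.find s (String.ofList [c]) == -1)

theorem everyOther_cons (c : Char) (xs : List Char) :
    everyOther (c :: xs) = c :: everyOther xs.tail := by
  cases xs <;> simp [everyOther]

theorem pyRange2_nil (a b : Int) (h : b ≤ a) : PySem.List.pyRange a b 2 = [] := by
  rw [PySem.List.pyRange_of_pos a b (by norm_num)]
  simp [show ¬ a < b by omega]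

theorem pyRange2_cons (a b : Int) (h : a < b) :
    PySem.List.pyRange a b 2 = a :: PySem.List.pyRange (a + 2) b 2 := by
  rw [PySem.List.pyRange_of_pos a b (by norm_num),
      PySem.List.pyRange_of_pos (a + 2) b (by norm_num)]
  have hc : (if a < b then ((b - a + 2 - 1) / 2).toNat else 0)
      = (if a + 2 < b then ((b - (a + 2) + 2 - 1) / 2).toNat else 0) + 1 := by
    split_ifs <;> omega
  rw [hc, List.range_succ_eq_map, List.map_cons, List.map_map]
  refine List.cons_eq_cons.mpr ⟨by simp, ?_⟩
  apply List.map_congr_left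
  intro k _
  simp only [Function.comp_apply]
  push_cast
  ring

theorem aLoop_cons (word s : String) (i : Int) (c : Char) (rest : List Int)
    (hget : PySem.Str.pyGet? word i = some c) :
    aLoop word s (i :: rest) = (testOk s c && aLoop word s rest) := by
  simp only [aLoop, hget, testOk]
  cases PySem.Str.find s (String.ofList [c]) == -1 <;> simp

theorem aLoop_eq_aux (word s : String) :
    ∀ (n k : Nat), word.toList.length - k ≤ n →
    aLoop word s (PySem.List.pyRange (k : Int) ((word.toList.length : Int)) 2)
      = (everyOther (word.toList.drop k)).all (testOk s) := by
  intro n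
  induction n with
  | zero =>
    intro k h
    have hk : word.toList.length ≤ k := by omega
    rw [pyRange2_nil _ _ (by exact_mod_cast hk), List.drop_eq_nil_of_le hk]
    simp [aLoop, everyOther]
  | succ n ih =>
    intro k h
    by_cases hk : k < word.toList.length
    · rw [pyRange2_cons _ _ (by exact_mod_cast hk)]
      have hget : PySem.Str.pyGet? word (k : Int) = some (word.toList[k]'hk) := by
        simp [List.getElem?_eq_getElem hk]
      have hdrop : word.toList.drop k = word.toList[k]'hk :: word.toList.drop (k + 1) :=
        (List.getElem_cons_drop hk).symm
      rw [aLoop_cons word s _ _ _ hget, hdrop, everyOther_cons, List.all_cons,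
          List.tail_drop]
      have ih2 := ih (k + 2) (by omega)
      rw [show ((k : Int) + 2) = ((k + 2 : Nat) : Int) by push_cast; ring, ih2]
    · have hk' : word.toList.length ≤ k := by omega
      rw [pyRange2_nil _ _ (by exact_mod_cast hk'), List.drop_eq_nil_of_le hk']
      simp [aLoop, everyOther]

theorem aLoop_eq (word s : String) (k : Nat) :
    aLoop word s (PySem.List.pyRange (k : Int) (PySem.Str.len word) 2)
      = (everyOther (word.toList.drop k)).all (testOk s) := by
  rw [show PySem.Str.len word = (word.toList.length : Int) by simp [PySem.Str.len_eq]]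
  exact aLoop_eq_aux word s word.toList.length k (by omega)

theorem bGo_cons (e a : String) (i : Nat) (c : Char) (rest : List Char) :
    bGo e a i (c :: rest)
      = (testOk (if i % 2 == 0 then e else a) c && bGo e a (i + 1) rest) := by
  simp only [bGo, testOk]
  cases PySem.Str.find (if i % 2 == 0 then e else a) (String.ofList [c]) == -1 <;> simp

theorem bGo_eq (e a : String) (i : Nat) (l : List Char) :
    bGo e a i l = ((everyOther l).all (testOk (if i % 2 == 0 then e else a))
      && (everyOther l.tail).all (testOk (if (i + 1) % 2 == 0 then e else a))) := by
  induction l generalizing i with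
  | nil => simp [bGo, everyOther]
  | cons c rest ih =>
    rw [everyOther_cons, bGo_cons, ih (i + 1), List.tail_cons, List.all_cons,
        show (i + 1 + 1) % 2 = i % 2 by omega]
    cases testOk (if i % 2 == 0 then e else a) c <;>
    cases (everyOther rest.tail).all (testOk (if i % 2 == 0 then e else a)) <;>
    cases (everyOther rest).all (testOk (if (i + 1) % 2 == 0 then e else a)) <;>
    simp

-- ===== VERDICT (by name: the statement is the Claim_ definition above) =====
theorem check_stripe_spec : Claim_equal_check_stripe := by
  intro word even add _
  unfold Spec_check_stripe check_stripe check_stripe_alt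
  rw [bGo_eq]
  have h0 := aLoop_eq word even 0
  have h1 := aLoop_eq word add 1
  push_cast at h0 h1
  rw [h0, h1, List.drop_zero, List.drop_one]
  by_cases h : (everyOther word.toList).all (testOk even) <;> simp [h]
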